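-- pv_equiv track=rewrite | github.com/amcgavin/advent-of-code | 2023/python/19.py | solve_for
-- ===== SOURCE A (Python) =====
-- def solve_for(target, rules):
--     new_rules = []
--     for label, ruleset in rules.items():
--         for i, (key, op, n, accept) in enumerate(ruleset):
--             if accept == target:
--                 rule = []
--                 rule.insert(0, (key, op, n, accept, False))
--                 for j in range(i - 1, -1, -1):
--                     rule.insert(0, (*ruleset[j], True))
--                 new_rules.append((label, rule))
--     return new_rules
-- ===== SOURCE B (Python) =====
-- def solve_for(target, rules):
--     out = []
--     for label, ruleset in rules.items():
--         prefix = []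
--         for key, op, n, accept in ruleset:
--             if accept == target:
--                 out.append((label, prefix + [(key, op, n, accept, False)]))
--             prefix = prefix + [(key, op, n, accept, True)]
--     return out
-- ===== Notes on version B (the rewrite author's own statement) =====
-- stated objective: simpler
-- what changed: B carries a growing prefix of already-seen rules in a single forward pass, so A's inner backwards rebuild loop (range(i-1,-1,-1) with insert(0,...)) over preceding rules disappears.
import Mathlib
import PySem

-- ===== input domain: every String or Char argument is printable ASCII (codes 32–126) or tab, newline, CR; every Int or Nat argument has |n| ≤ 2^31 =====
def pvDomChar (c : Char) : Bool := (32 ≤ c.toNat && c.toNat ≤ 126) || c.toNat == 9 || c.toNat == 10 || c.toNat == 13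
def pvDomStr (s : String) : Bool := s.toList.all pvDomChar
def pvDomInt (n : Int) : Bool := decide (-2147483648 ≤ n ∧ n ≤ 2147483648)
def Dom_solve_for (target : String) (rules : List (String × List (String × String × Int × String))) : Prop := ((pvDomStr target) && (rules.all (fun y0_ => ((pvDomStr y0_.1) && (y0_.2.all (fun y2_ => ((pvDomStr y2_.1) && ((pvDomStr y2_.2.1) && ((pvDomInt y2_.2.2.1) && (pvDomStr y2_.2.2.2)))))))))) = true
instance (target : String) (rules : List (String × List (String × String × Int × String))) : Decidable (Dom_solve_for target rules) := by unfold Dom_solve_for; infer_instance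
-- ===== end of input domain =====

set_option maxRecDepth 8000


-- ===== PORT A =====
-- helper: tag a rule with a Bool (the tuple (*rule, b))
def pvTag (b : Bool) (q : String × String × Int × String) : String × String × Int × String × Bool :=
  (q.1, q.2.1, q.2.2.1, q.2.2.2, b)

-- literal port of A: for each (label, ruleset) in rules.items(), enumerate the ruleset;
-- on a match build `rule` by insert(0, ...) then a backwards range loop re-inserting the
-- preceding rules at the front (pyGetD is exact here: every index j of the loop is in range).
def solve_for (target : String) (rules : List (String × List (String × String × Int × String))) : List (String × (List (String × String × Int × String × Bool))) :=
  rules.foldl (fun new_rules lr =>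
    (PySem.List.enumerate lr.2 0).foldl (fun nr p =>
      let i := p.1
      if p.2.2.2.2 = target then
        let rule : List (String × String × Int × String × Bool) :=
          PySem.List.insert [] 0 (pvTag false p.2)
        let rule := (PySem.List.pyRange (i - 1) (-1) (-1)).foldl
          (fun r j => PySem.List.insert r 0 (pvTag true (PySem.List.pyGetD lr.2 j ("", "", 0, "")))) rule
        nr ++ [(lr.1, rule)]
      else nr) new_rules) []

-- ===== PORT B =====
-- literal port of B: one forward pass per ruleset carrying (out, prefix)
def solve_for_alt (target : String) (rules : List (String × List (String × String × Int × String))) : List (String × (List (String × String × Int × String × Bool))) :=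
  rules.foldl (fun out lr =>
    (lr.2.foldl
      (fun (st : List (String × (List (String × String × Int × String × Bool))) × List (String × String × Int × String × Bool)) r =>
        (if r.2.2.2 = target then st.1 ++ [(lr.1, st.2 ++ [pvTag false r])] else st.1,
         st.2 ++ [pvTag true r]))
      (out, [])).1) []

-- ===== PRECONDITION & SPEC =====
-- DecidableEq for the output type, spelled out (instance search times out on the nested product)
def pvDecEqInner : DecidableEq (List (String × String × Int × String × Bool)) := fun a b => List.hasDecEq a b
def pvDecEqPair : DecidableEq (String × List (String × String × Int × String × Bool)) := @instDecidableEqProd _ _ inferInstance pvDecEqInner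
def pvDecEqOut : DecidableEq (List (String × List (String × String × Int × String × Bool))) := @List.hasDecEq _ pvDecEqPair

def Spec_solve_for (target : String) (rules : List (String × List (String × String × Int × String))) (out : List (String × (List (String × String × Int × String × Bool)))) : Prop := out = solve_for_alt target rules
instance (target : String) (rules : List (String × List (String × String × Int × String))) (out : List (String × (List (String × String × Int × String × Bool)))) : Decidable (Spec_solve_for target rules out) := by unfold Spec_solve_for; exact pvDecEqOut out (solve_for_alt target rules)

-- ===== CLAIM (what is proved, stated in full; the proofs are below) =====
def Claim_equal_solve_for : Prop := ∀ (target : String) (rules : List (String × List (String × String × Int × String))), Dom_solve_for target rules → Spec_solve_for target rules (solve_for target rules)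

-- ===== LEMMAS AND PROOFS =====

-- A's backwards rebuild loop over range(i-1,-1,-1) produces the tagged prefix of the first i rules
lemma pv_rebuild (rs : List (String × String × Int × String)) (i : Nat) (h : i ≤ rs.length)
    (init : List (String × String × Int × String × Bool)) :
    (PySem.List.pyRange ((i : Int) - 1) (-1) (-1)).foldl
      (fun r j => PySem.List.insert r 0 (pvTag true (PySem.List.pyGetD rs j ("", "", 0, "")))) init
    = (rs.take i).map (pvTag true) ++ init := by
  induction i generalizing init with
  | zero =>
      rw [show ((0 : Nat) : Int) - 1 = -1 by norm_num,
        PySem.List.pyRange_neg_one_eq_nil (by omega)]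
      simp
  | succ k ih =>
      have hk : k < rs.length := by omega
      rw [show ((k + 1 : Nat) : Int) - 1 = (k : Int) by push_cast; ring,
        PySem.List.pyRange_neg_one_cons (by omega), List.foldl_cons,
        PySem.List.pyGetD_eq_getElem rs _ (by omega) (by exact_mod_cast hk),
        PySem.List.insert_zero]
      rw [ih (by omega)]
      have hm : k < (List.map (pvTag true) rs).length := by simpa using hk
      rw [List.map_take, List.map_take, List.take_add_one, List.getElem?_eq_getElem hm,
        List.getElem_map]
      simp

-- the two inner loops over one ruleset agree, given B's prefix = tagged processed part of the ruleset
lemma pv_inner (target label : String) (full : List (String × String × Int × String)) :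
    ∀ (suf : List (String × String × Int × String)) (s : Nat)
      (acc : List (String × (List (String × String × Int × String × Bool))))
      (pre : List (String × String × Int × String × Bool)),
      full.drop s = suf → pre = (full.take s).map (pvTag true) →
    (PySem.List.enumerate suf (s : Int)).foldl (fun nr p =>
        let i := p.1
        if p.2.2.2.2 = target then
          let rule : List (String × String × Int × String × Bool) :=
            PySem.List.insert [] 0 (pvTag false p.2)
          let rule := (PySem.List.pyRange (i - 1) (-1) (-1)).foldl
            (fun r j => PySem.List.insert r 0 (pvTag true (PySem.List.pyGetD full j ("", "", 0, "")))) rule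
          nr ++ [(label, rule)]
        else nr) acc
    = (suf.foldl
        (fun (st : List (String × (List (String × String × Int × String × Bool))) × List (String × String × Int × String × Bool)) r =>
          (if r.2.2.2 = target then st.1 ++ [(label, st.2 ++ [pvTag false r])] else st.1,
           st.2 ++ [pvTag true r]))
        (acc, pre)).1 := by
  intro suf
  induction suf with
  | nil => intro s acc pre _ _; rw [PySem.List.enumerate_nil]; rfl
  | cons x rest ih =>
      intro s acc pre hdrop hpre
      have hs : s < full.length := by
        by_contra hle
        rw [List.drop_eq_nil_of_le (by omega)] at hdrop
        exact List.cons_ne_nil _ _ hdrop.symm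
      have hx : full[s]? = some x := by
        have h0 := List.getElem?_drop (xs := full) (i := s) (j := 0)
        rw [hdrop] at h0; simpa using h0.symm
      have hdrop' : full.drop (s + 1) = rest := by
        have h1 : full.drop (s + 1) = (full.drop s).drop 1 := by
          rw [List.drop_drop]
        rw [h1, hdrop, List.drop_one, List.tail_cons]
      have hpre' : pre ++ [pvTag true x] = (full.take (s + 1)).map (pvTag true) := by
        rw [List.take_add_one, hx, hpre]
        simp
      rw [PySem.List.enumerate_cons, List.foldl_cons, List.foldl_cons]
      dsimp only
      rw [PySem.List.insert_zero, pv_rebuild full s (by omega) [pvTag false x]]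
      by_cases hacc : x.2.2.2 = target
      · simp only [hacc, ← hpre]
        rw [show (s : Int) + 1 = ((s + 1 : Nat) : Int) by push_cast; ring]
        exact ih (s + 1) _ _ hdrop' hpre'
      · simp only [if_neg hacc]
        rw [show (s : Int) + 1 = ((s + 1 : Nat) : Int) by push_cast; ring]
        exact ih (s + 1) _ _ hdrop' hpre'

-- ===== VERDICT (by name: the statement is the Claim_ definition above) =====
theorem solve_for_spec : Claim_equal_solve_for := by
  intro target rules _
  unfold Spec_solve_for solve_for solve_for_alt
  apply List.foldl_ext
  intro acc lr _
  have h := pv_inner target lr.1 lr.2 lr.2 0 acc [] (by simp) (by simp)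
  simpa using h
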